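-- pv_equiv track=rewrite | github.com/TDteach/3GPP-Conformance-Test | main.py | and_flatten_or_and_list
-- ===== SOURCE A (Python) =====
-- import copy
--
-- def and_flatten_or_and_list(a):
--     gathered_list = list()
--     na = len(a)
--
--     def _dfs_list(i, record):
--         if i >= na:
--             # to do remove replacement
--             gathered_list.append(copy.deepcopy(record))
--             return
--         for z in a[i]:
--             for zz in z:
--                 record.append(zz)
--             _dfs_list(i + 1, record)
--             for zz in z:
--                 record.pop()
--
--     _dfs_list(0, [])
--
--     return gathered_list
-- ===== SOURCE B (Python) =====
-- import copy
--
-- def and_flatten_or_and_list(a):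
--     # Iterative Cartesian-product accumulation: grow all partial records in
--     # parallel instead of recursive DFS backtracking on a single record.
--     results = [[]]
--     for sub in a:
--         results = [r + list(z) for r in results for z in sub]
--     return [copy.deepcopy(r) for r in results]
-- ===== Notes on version B (the rewrite author's own statement) =====
-- stated objective: idiomatic
-- what changed: Replaces the recursive DFS with append/pop backtracking on a shared record by an iterative Cartesian-product fold that rebuilds the full list of partial records per level.
import Mathlib
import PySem

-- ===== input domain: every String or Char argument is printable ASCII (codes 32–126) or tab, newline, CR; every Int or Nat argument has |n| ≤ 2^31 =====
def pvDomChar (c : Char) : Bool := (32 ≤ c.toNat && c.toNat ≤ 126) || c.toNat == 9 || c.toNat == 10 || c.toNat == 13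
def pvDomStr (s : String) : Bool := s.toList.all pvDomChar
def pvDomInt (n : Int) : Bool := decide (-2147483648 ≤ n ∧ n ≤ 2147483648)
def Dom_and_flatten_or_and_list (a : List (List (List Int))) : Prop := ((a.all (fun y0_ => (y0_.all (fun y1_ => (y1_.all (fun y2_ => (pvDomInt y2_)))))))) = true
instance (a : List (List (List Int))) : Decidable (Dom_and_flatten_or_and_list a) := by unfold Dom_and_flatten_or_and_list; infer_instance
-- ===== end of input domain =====

-- B replaces A's recursive DFS backtracking by an iterative Cartesian-product fold (same cost; objective: idiomatic).

-- ===== PORT A =====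
-- A's _dfs_list(i, record): at i = na it appends a copy of record; otherwise, for each
-- z in a[i], it extends record by z, recurses on i+1, and pops z back off. The list of
-- records gathered from state (i, record) is exactly this structural recursion over the
-- remaining sublists with the current record as accumulator (copy.deepcopy = identity here).
def pvDfsA (rest : List (List (List Int))) (record : List Int) : List (List Int) :=
  match rest with
  | [] => [record]
  | s :: rest' => s.flatMap (fun z => pvDfsA rest' (record ++ z))

def and_flatten_or_and_list (a : List (List (List Int))) : List (List Int) :=
  pvDfsA a []

-- ===== PORT B =====
-- results = [[]]; for sub in a: results = [r + z for r in results for z in sub]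
def and_flatten_or_and_list_alt (a : List (List (List Int))) : List (List Int) :=
  a.foldl (fun results sub => results.flatMap (fun r => sub.map (fun z => r ++ z))) [[]]

-- ===== PRECONDITION & SPEC =====
def Spec_and_flatten_or_and_list (a : List (List (List Int))) (out : List (List Int)) : Prop := out = and_flatten_or_and_list_alt a
instance (a : List (List (List Int))) (out : List (List Int)) : Decidable (Spec_and_flatten_or_and_list a out) := by unfold Spec_and_flatten_or_and_list; infer_instance

-- ===== CLAIM (what is proved, stated in full; the proofs are below) =====
def Claim_equal_and_flatten_or_and_list : Prop := ∀ (a : List (List (List Int))), Dom_and_flatten_or_and_list a → Spec_and_flatten_or_and_list a (and_flatten_or_and_list a)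

-- ===== LEMMAS AND PROOFS =====

-- B's fold from any bag of partial records equals flat-mapping A's DFS over them.
theorem pvFoldl_eq_flatMap_dfs (l : List (List (List Int))) (recs : List (List Int)) :
    l.foldl (fun results sub => results.flatMap (fun r => sub.map (fun z => r ++ z))) recs
      = recs.flatMap (fun r => pvDfsA l r) := by
  induction l generalizing recs with
  | nil => simp [pvDfsA]
  | cons s rest ih =>
    rw [List.foldl_cons, ih]
    simp [List.flatMap_assoc, List.flatMap_map, pvDfsA]

-- ===== VERDICT (by name: the statement is the Claim_ definition above) =====
theorem and_flatten_or_and_list_spec : Claim_equal_and_flatten_or_and_list := by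
  intro a _
  unfold Spec_and_flatten_or_and_list and_flatten_or_and_list and_flatten_or_and_list_alt
  rw [pvFoldl_eq_flatMap_dfs]
  simp
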